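-- pv_equiv track=rewrite | github.com/pennyworth-tech/agent-arborist | src/agent_arborist/tasks.py | _extract_message_from_description
-- ===== SOURCE A (Python) =====
-- def _extract_message_from_description(desc: str) -> str:
--     """Extract the commit message from a description (everything after first line).
--
--     Description format:
--         spec-id:T001:T005:T006
--
--         This is the commit message
--         describing what was done
--
--     Returns: "This is the commit message\ndescribing what was done"
--     """
--     if not desc:
--         return ""
--     lines = desc.split("\n")
--     if len(lines) <= 1:
--         return ""
--     # Skip first line (task path) and any empty lines after it
--     message_lines = lines[1:]
--     # Strip leading empty lines
--     while message_lines and not message_lines[0].strip():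
--         message_lines.pop(0)
--     return "\n".join(message_lines).strip()
-- ===== SOURCE B (Python) =====
-- def _extract_message_from_description(desc: str) -> str:
--     head, sep, rest = desc.partition("\n")
--     if not sep:
--         return ""
--     return rest.strip()
-- ===== Notes on version B (the rewrite author's own statement) =====
-- stated objective: simpler
-- what changed: Replaces the line-list construction, slice and leading-blank-line pop loop with a single partition at the first newline followed by one strip, which already removes any leading blank lines.
import Mathlib
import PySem

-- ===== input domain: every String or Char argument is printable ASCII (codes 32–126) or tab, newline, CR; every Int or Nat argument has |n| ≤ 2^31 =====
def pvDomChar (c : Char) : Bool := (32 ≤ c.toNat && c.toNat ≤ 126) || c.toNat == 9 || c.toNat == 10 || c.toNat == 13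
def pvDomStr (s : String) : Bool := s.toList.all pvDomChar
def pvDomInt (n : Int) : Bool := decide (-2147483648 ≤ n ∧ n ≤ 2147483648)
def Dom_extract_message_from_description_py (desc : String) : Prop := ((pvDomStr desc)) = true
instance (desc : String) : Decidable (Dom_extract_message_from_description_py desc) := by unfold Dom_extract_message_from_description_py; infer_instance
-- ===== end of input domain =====

-- B replaces A's line list, slice and leading-blank-line pop loop with one partition at the
-- first newline followed by a single strip (objective: simpler).

-- B replaces A's line list, slice and leading-blank-line pop loop with one partition at the
-- first newline followed by a single strip (objective: simpler).

-- ===== PORT A =====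
-- while message_lines and not message_lines[0].strip(): message_lines.pop(0)
def pyDropBlank : List String → List String
  | [] => []
  | x :: xs => if PySem.Str.strip x == "" then pyDropBlank xs else x :: xs

def extract_message_from_description_py (desc : String) : String :=
  if desc == "" then ""
  else
    match PySem.Str.split? desc "\n" with
    | none => ""   -- unreachable: the separator "\n" is nonempty, so split? always returns some
    | some lines =>
      if lines.length ≤ 1 then ""
      else
        let message_lines := pyDropBlank (PySem.List.slice lines (some 1) none)
        PySem.Str.strip (PySem.Str.join "\n" message_lines)

-- ===== PORT B =====
-- head, sep, rest = desc.partition("\n"); if not sep: return ""; return rest.strip()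
def extract_message_from_description_py_alt (desc : String) : String :=
  let i := PySem.Str.find desc "\n"
  if i = -1 then ""
  else PySem.Str.strip (PySem.Str.slice desc (some (i + 1)) none)

-- ===== PRECONDITION & SPEC =====
def Spec_extract_message_from_description_py (desc : String) (out : String) : Prop := out = extract_message_from_description_py_alt desc
instance (desc : String) (out : String) : Decidable (Spec_extract_message_from_description_py desc out) := by unfold Spec_extract_message_from_description_py; infer_instance

-- ===== CLAIM (what is proved, stated in full; the proofs are below) =====
def Claim_equal_extract_message_from_description_py : Prop := ∀ (desc : String), Dom_extract_message_from_description_py desc → Spec_extract_message_from_description_py desc (extract_message_from_description_py desc)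

-- ===== LEMMAS AND PROOFS =====

def splitNl : List Char → List (List Char)
  | [] => [[]]
  | a :: t =>
    if a = '\n' then [] :: splitNl t
    else match splitNl t with
      | x :: xs => (a :: x) :: xs
      | [] => [[a]]

theorem splitNl_ne_nil (s : List Char) : splitNl s ≠ [] := by
  cases s with
  | nil => simp [splitNl]
  | cons a t =>
    simp only [splitNl]
    split_ifs
    · simp
    · cases h : splitNl t <;> simp

theorem go_eq (fuel : Nat) : ∀ (l cur : List Char) (acc : List (List Char)), l.length ≤ fuel →
    PySem.Chars.splitOn.go ['\n'] fuel l cur acc =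
      acc.reverse ++ (match splitNl l with
        | x :: xs => (cur.reverse ++ x) :: xs
        | [] => [cur.reverse]) := by
  induction fuel with
  | zero =>
    intro l cur acc h
    have : l = [] := by cases l <;> simp_all
    subst this
    simp [PySem.Chars.splitOn.go, splitNl]
  | succ n ih =>
    intro l cur acc h
    cases l with
    | nil => simp [PySem.Chars.splitOn.go, splitNl]
    | cons a t =>
      rw [PySem.Chars.splitOn.go]
      by_cases ha : a = '\n'
      · subst ha
        have hp : List.isPrefixOf ['\n'] ('\n' :: t) = true := by simp [List.isPrefixOf]
        simp only [hp, if_true]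
        rw [ih _ _ _ (by simpa using h)]
        simp only [splitNl, List.reverse_cons, List.append_assoc,
          List.reverse_nil, List.nil_append, List.singleton_append]
        cases hs : splitNl t with
        | nil => exact absurd hs (splitNl_ne_nil t)
        | cons x xs => simp [hs]
      · have hp : List.isPrefixOf ['\n'] (a :: t) = false := by
          simp only [List.isPrefixOf, Bool.and_eq_false_iff]
          left; simpa using fun hc => absurd hc.symm ha
        simp only [hp, if_false, Bool.false_eq_true]
        rw [ih _ _ _ (by simpa using h)]
        simp only [splitNl, ha, if_false]
        cases hs : splitNl t with
        | nil => simp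
        | cons x xs => simp

theorem splitOn_eq (s : List Char) : PySem.Chars.splitOn s ['\n'] = splitNl s := by
  rw [PySem.Chars.splitOn, go_eq _ _ _ _ (by omega)]
  cases hs : splitNl s with
  | nil => exact absurd hs (splitNl_ne_nil s)
  | cons x xs => simp

theorem splitNl_not_mem (s : List Char) (h : '\n' ∉ s) : splitNl s = [s] := by
  induction s with
  | nil => simp [splitNl]
  | cons a t ih =>
    simp only [List.mem_cons, not_or] at h
    have ha : ¬ a = '\n' := fun hc => h.1 hc.symm
    simp only [splitNl, if_neg ha, ih h.2]

theorem splitNl_append (p r : List Char) (h : '\n' ∉ p) :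
    splitNl (p ++ '\n' :: r) = p :: splitNl r := by
  induction p with
  | nil => simp [splitNl]
  | cons a t ih =>
    simp only [List.mem_cons, not_or] at h
    have ha : ¬ a = '\n' := fun hc => h.1 hc.symm
    simp only [List.cons_append, splitNl, if_neg ha, ih h.2]

theorem join_splitNl (r : List Char) : PySem.Chars.join ['\n'] (splitNl r) = r := by
  induction r with
  | nil => simp [splitNl, PySem.Chars.join, List.intercalate]
  | cons a t ih =>
    by_cases ha : a = '\n'
    · subst ha
      have hcons : splitNl ('\n' :: t) = [] :: splitNl t := by simp [splitNl]
      rw [hcons]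
      cases hs : splitNl t with
      | nil => exact absurd hs (splitNl_ne_nil t)
      | cons x xs =>
        rw [hs] at ih
        rw [PySem.Chars.join_cons_cons]
        simpa [PySem.Chars.join] using ih
    · cases hs : splitNl t with
      | nil => exact absurd hs (splitNl_ne_nil t)
      | cons x xs =>
        have hcons : splitNl (a :: t) = (a :: x) :: xs := by simp [splitNl, if_neg ha, hs]
        rw [hcons]
        rw [hs] at ih
        cases xs with
        | nil =>
          rw [PySem.Chars.join_singleton]
          rw [PySem.Chars.join_singleton] at ih
          rw [ih]
        | cons y ys =>
          rw [PySem.Chars.join_cons_cons]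
          rw [PySem.Chars.join_cons_cons] at ih
          simp_all

theorem lstrip_blank_append (x l : List Char) (h : ∀ a ∈ x, PySem.Chars.isspace a = true) :
    PySem.Chars.lstrip (x ++ l) = PySem.Chars.lstrip l := by
  simp only [PySem.Chars.lstrip, List.dropWhile_append]
  simp [List.dropWhile_eq_nil_iff.2 h]

theorem blank_of_strip_nil (x : List Char) (h : PySem.Chars.strip x = []) :
    ∀ a ∈ x, PySem.Chars.isspace a = true := by
  simp only [PySem.Chars.strip, PySem.Chars.rstrip, PySem.Chars.lstrip] at h
  have h2 : ∀ a ∈ (List.dropWhile PySem.Chars.isspace x).reverse, PySem.Chars.isspace a = true := by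
    rw [← List.dropWhile_eq_nil_iff]
    simpa using congrArg List.reverse h
  intro a ha
  rcases (List.takeWhile_append_dropWhile (p := PySem.Chars.isspace) (l := x)) ▸ ha with ha'
  rw [← List.takeWhile_append_dropWhile (p := PySem.Chars.isspace) (l := x)] at ha
  rcases List.mem_append.1 ha with h1 | h1
  · exact List.mem_takeWhile_imp h1
  · exact h2 a (by simpa using h1)

theorem strip_blank_cons (x : List Char) (ms : List (List Char))
    (h : ∀ a ∈ x, PySem.Chars.isspace a = true) :
    PySem.Chars.strip (PySem.Chars.join ['\n'] (x :: ms)) =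
      PySem.Chars.strip (PySem.Chars.join ['\n'] ms) := by
  cases ms with
  | nil =>
    rw [PySem.Chars.join_singleton]
    have : PySem.Chars.join ['\n'] ([] : List (List Char)) = [] := by
      simp [PySem.Chars.join, List.intercalate]
    rw [this]
    simp only [PySem.Chars.strip]
    rw [show x = x ++ [] from (List.append_nil x).symm, lstrip_blank_append x [] h]
  | cons y ys =>
    rw [PySem.Chars.join_cons_cons]
    simp only [PySem.Chars.strip]
    rw [show x ++ ['\n'] ++ PySem.Chars.join ['\n'] (y :: ys)
          = (x ++ ['\n']) ++ PySem.Chars.join ['\n'] (y :: ys) by simp,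
        lstrip_blank_append (x ++ ['\n']) _ (by
          intro a ha; rcases List.mem_append.1 ha with h1 | h1
          · exact h a h1
          · simp at h1; subst h1; decide)]

theorem mem_decomp (s : List Char) (h : '\n' ∈ s) :
    ∃ p r, s = p ++ '\n' :: r ∧ '\n' ∉ p := by
  induction s with
  | nil => simp at h
  | cons a t ih =>
    by_cases ha : a = '\n'
    · exact ⟨[], t, by simp [ha], by simp⟩
    · rcases ih (by rcases List.mem_cons.1 h with h1 | h1; exacts [absurd h1.symm ha, h1]) with ⟨p, r, hpr, hnp⟩
      exact ⟨a :: p, r, by simp [hpr], by simp [hnp]; exact fun hc => ha hc.symm⟩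

theorem find_decomp (p r : List Char) (hp : '\n' ∉ p) :
    PySem.Chars.find (p ++ '\n' :: r) ['\n'] = (p.length : Int) := by
  set s := p ++ '\n' :: r with hs
  have hinf : ['\n'] <:+: s := ⟨p, r, by simp [hs]⟩
  have hnn : 0 ≤ PySem.Chars.find s ['\n'] := (PySem.Chars.find_nonneg_iff s ['\n']).2 hinf
  obtain ⟨hpre, hmin⟩ := PySem.Chars.find_spec (s := s) (sub := ['\n']) hnn
  set j := (PySem.Chars.find s ['\n']).toNat with hj
  have hple : ['\n'] <+: s.drop p.length := by simp [hs]
  have hjle : j ≤ p.length := by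
    by_contra hlt
    exact hmin p.length (by omega) hple
  have hje : j = p.length := by
    rcases Nat.lt_or_ge j p.length with hlt | hge
    · exfalso
      rcases hpre with ⟨t, ht⟩
      have hgj : s[j]? = some '\n' := by
        rw [← List.head?_drop, ← ht]; rfl
      have : p[j]? = some '\n' := by
        rw [hs] at hgj
        rwa [List.getElem?_append_left hlt] at hgj
      exact hp (List.mem_of_getElem? this)
    · omega
  omega

theorem str_join_eq (ms : List String) :
    PySem.Str.join "\n" ms = String.ofList (PySem.Chars.join ['\n'] (ms.map String.toList)) := by
  simp [PySem.Str.join]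

theorem strip_join_dropBlank (ms : List String) :
    PySem.Str.strip (PySem.Str.join "\n" (pyDropBlank ms)) =
      PySem.Str.strip (PySem.Str.join "\n" ms) := by
  induction ms with
  | nil => rfl
  | cons x xs ih =>
    by_cases hb : PySem.Str.strip x == ""
    · rw [show pyDropBlank (x :: xs) = pyDropBlank xs from by simp [pyDropBlank, hb], ih]
      have hblank : ∀ a ∈ x.toList, PySem.Chars.isspace a = true := by
        apply blank_of_strip_nil
        have : PySem.Str.strip x = "" := by simpa using hb
        have := congrArg String.toList this
        simpa [PySem.Str.strip] using this
      rw [str_join_eq, str_join_eq]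
      simp only [PySem.Str.strip]
      rw [← String.toList_inj]
      simp only [String.toList_ofList]
      exact (strip_blank_cons x.toList (xs.map String.toList) hblank).symm
    · rw [show pyDropBlank (x :: xs) = x :: xs from by rw [pyDropBlank, if_neg hb]]

theorem main_eq (desc : String) :
    extract_message_from_description_py desc = extract_message_from_description_py_alt desc := by
  by_cases hmem : '\n' ∈ desc.toList
  · -- there is a newline
    rcases mem_decomp desc.toList hmem with ⟨p, r, hpr, hnp⟩
    have hsplit : PySem.Str.split? desc "\n" = some ((p :: splitNl r).map String.ofList) := by
      simp [PySem.Str.split?, PySem.Chars.split?, splitOn_eq, hpr, splitNl_append p r hnp]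
    have hne : desc ≠ "" := by
      intro h
      rw [h] at hpr
      simp at hpr
    have hfind : PySem.Str.find desc "\n" = (p.length : Int) := by
      simp only [PySem.Str.find]
      rw [show ("\n" : String).toList = ['\n'] by simp, hpr]
      exact find_decomp p r hnp
    have hlen : ¬ ((p :: splitNl r).map String.ofList).length ≤ 1 := by
      cases hs : splitNl r with
      | nil => exact absurd hs (splitNl_ne_nil r)
      | cons x xs => simp
    have hfne : ¬ ((p.length : Int) = -1) := by omega
    rw [extract_message_from_description_py, extract_message_from_description_py_alt]
    simp only [if_neg (show ¬ (desc == "") = true by simpa using hne), hsplit, if_neg hlen,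
      hfind, if_neg hfne]
    rw [PySem.List.slice_from_one]
    simp only [List.map_cons, List.tail_cons]
    rw [strip_join_dropBlank, str_join_eq]
    have hslice : PySem.Str.slice desc (some ((p.length : Int) + 1)) none = String.ofList r := by
      simp only [PySem.Str.slice, PySem.Chars.slice_eq_listSlice]
      have h1 : ((p.length : Int) + 1) = (((p.length + 1 : Nat)) : Int) := by push_cast; ring
      rw [h1, PySem.List.slice_from_natCast, hpr]
      rw [show p ++ '\n' :: r = (p ++ ['\n']) ++ r by simp]
      rw [show p.length + 1 = (p ++ ['\n']).length by simp]
      rw [List.drop_left]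
    rw [hslice]
    simp only [PySem.Str.strip]
    rw [← String.toList_inj]
    simp only [String.toList_ofList]
    congr 1
    have hmm : List.map String.toList (List.map String.ofList (splitNl r)) = splitNl r := by
      simp [List.map_map, Function.comp_def]
    rw [hmm]
    exact join_splitNl r
  · -- no newline
    have hfind : PySem.Str.find desc "\n" = -1 := by
      apply (PySem.Str.find_eq_neg_one_iff desc "\n").2
      rw [show ("\n" : String).toList = ['\n'] by simp]
      intro hinf
      exact hmem (by
        rcases hinf with ⟨p, r, hpr⟩
        rw [← hpr]; simp)
    rw [extract_message_from_description_py, extract_message_from_description_py_alt]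
    simp only [hfind]
    by_cases hz : desc = ""
    · simp [hz]
    · rw [if_neg (by simpa using hz)]
      have hsplit : PySem.Str.split? desc "\n" = some [String.ofList desc.toList] := by
        simp [PySem.Str.split?, PySem.Chars.split?, splitOn_eq, splitNl_not_mem desc.toList hmem]
      rw [hsplit]
      simp

-- ===== VERDICT (by name: the statement is the Claim_ definition above) =====
theorem extract_message_from_description_py_spec : Claim_equal_extract_message_from_description_py := by
  intro desc _
  exact main_eq desc
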